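-- pv_equiv track=rewrite | github.com/phamngoctan/python-playground | leetcode/max_chunks_to_make_sorted.py | maxChunksToSorted_better
-- ===== SOURCE A (Python) =====
-- from typing import List
--
-- def maxChunksToSorted_better(arr: List[int]) -> int:
--   '''Greedy solution - prove by contradiction'''
--   maxArr = []
--   maxSoFar = -1
--   for num in arr:
--     maxSoFar = max(maxSoFar, num)
--     maxArr.append(maxSoFar)
--   ans = 0
--   for i, num in enumerate(arr):
--     if i == maxArr[i]:
--       ans += 1
--   return ans
-- ===== SOURCE B (Python) =====
-- from typing import List
--
-- def maxChunksToSorted_better(arr: List[int]) -> int: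
--   '''Divide and conquer on index intervals: solve(lo, hi, carry) returns the
--   number of chunk boundaries inside arr[lo:hi] together with the maximum of
--   carry and arr[lo:hi]; halves are solved recursively, the left maximum is
--   threaded into the right half.'''
--   def solve(lo: int, hi: int, carry: int):
--     if hi - lo == 1:
--       m = max(carry, arr[lo])
--       return (1 if m == lo else 0), m
--     mid = (lo + hi) // 2
--     c1, m1 = solve(lo, mid, carry)
--     c2, m2 = solve(mid, hi, m1)
--     return c1 + c2, m2
--   if not arr:
--     return 0
--   return solve(0, len(arr), -1)[0]
-- ===== Notes on version B (the rewrite author's own statement) =====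
-- stated objective: alternative
-- what changed: B replaces A's two staged passes (prefix-max table, then an indexed comparison scan) by divide and conquer on index intervals: a recursive solve(lo, hi, carry) that returns the boundary count and maximum of each half, threading the left half's maximum into the right half; no prefix-max list and no enumerate scan.
import Mathlib
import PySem

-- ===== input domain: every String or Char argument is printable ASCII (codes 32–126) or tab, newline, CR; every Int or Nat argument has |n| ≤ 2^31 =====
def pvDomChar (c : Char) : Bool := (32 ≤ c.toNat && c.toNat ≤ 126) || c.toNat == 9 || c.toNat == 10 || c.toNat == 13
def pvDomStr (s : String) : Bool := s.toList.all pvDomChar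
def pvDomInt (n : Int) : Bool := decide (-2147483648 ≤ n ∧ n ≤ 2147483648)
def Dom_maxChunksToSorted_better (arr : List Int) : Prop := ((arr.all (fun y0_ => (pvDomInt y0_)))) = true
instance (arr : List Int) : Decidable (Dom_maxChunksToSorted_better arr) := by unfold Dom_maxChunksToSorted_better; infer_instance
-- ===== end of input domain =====

-- B replaces A's two staged passes (prefix-max table, then a comparison scan) by divide and conquer on index intervals; an alternative decomposition, not claimed faster.

-- ===== PORT A =====
-- first loop: state (maxSoFar, maxArr); second loop: enumerate with ans.
-- maxArr[i]: the index i is always in range (len maxArr = len arr), so the .getD 0 default is never used.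
def maxChunksToSorted_better (arr : List Int) : Int :=
  let st := arr.foldl (fun (s : Int × List Int) num =>
    let m := max s.1 num
    (m, s.2 ++ [m])) ((-1 : Int), ([] : List Int))
  let maxArr := st.2
  (PySem.List.enumerate arr 0).foldl (fun ans p =>
    if p.1 == (PySem.List.pyGet? maxArr p.1).getD 0 then ans + 1 else ans) 0

-- ===== PORT B =====
-- solve(lo, hi, carry): Python tests 'hi - lo == 1' and only ever calls itself with lo < hi;
-- the 'hi ≤ lo + 1' guard is the same test made total for the termination measure.
-- arr[lo] has 0 ≤ lo < len arr on every reachable call, so the .getD 0 default is never used;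
-- (lo + hi) // 2 on the nonnegative bounds is Nat division, exactly Python's floor division.
def pvSolveB (arr : List Int) (lo hi : Nat) (carry : Int) : Int × Int :=
  if hi ≤ lo + 1 then
    let m := max carry ((PySem.List.pyGet? arr (lo : Int)).getD 0)
    (if m == (lo : Int) then 1 else 0, m)
  else
    let mid := (lo + hi) / 2
    let p1 := pvSolveB arr lo mid carry
    let p2 := pvSolveB arr mid hi p1.2
    (p1.1 + p2.1, p2.2)
termination_by hi - lo
decreasing_by all_goals omega

-- if not arr: return 0; else solve(0, len(arr), -1)[0]
def maxChunksToSorted_better_alt (arr : List Int) : Int :=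
  if arr = [] then 0 else (pvSolveB arr 0 arr.length (-1)).1

-- ===== PRECONDITION & SPEC =====
def Spec_maxChunksToSorted_better (arr : List Int) (out : Int) : Prop := out = maxChunksToSorted_better_alt arr
instance (arr : List Int) (out : Int) : Decidable (Spec_maxChunksToSorted_better arr out) := by unfold Spec_maxChunksToSorted_better; infer_instance

-- ===== CLAIM (what is proved, stated in full; the proofs are below) =====
def Claim_equal_maxChunksToSorted_better : Prop := ∀ (arr : List Int), Dom_maxChunksToSorted_better arr → Spec_maxChunksToSorted_better arr (maxChunksToSorted_better arr)

-- ===== LEMMAS AND PROOFS =====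

-- common linear specification: pvScan i m xs = (number of boundaries, final running max)
def pvScan (i m : Int) : List Int → Int × Int
  | [] => (0, m)
  | x :: xs =>
    let m' := max m x
    let r := pvScan (i + 1) m' xs
    (r.1 + (if m' == i then 1 else 0), r.2)

-- prefix-max list built by A's first loop
def pvPmax (m : Int) : List Int → List Int
  | [] => []
  | x :: xs => max m x :: pvPmax (max m x) xs

theorem pvFoldA_snd (xs : List Int) : ∀ (m : Int) (acc : List Int),
    (xs.foldl (fun (s : Int × List Int) num =>
      let m := max s.1 num
      (m, s.2 ++ [m])) (m, acc)).2 = acc ++ pvPmax m xs := by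
  induction xs with
  | nil => intro m acc; simp [pvPmax]
  | cons x xs ih =>
    intro m acc
    simp only [List.foldl_cons, pvPmax]
    rw [ih]
    simp

-- A's counting loop computes the pvScan count
theorem pvMainScan (xs : List Int) : ∀ (pre : List Int) (m ans : Int),
    (PySem.List.enumerate xs (pre.length : Int)).foldl (fun a p =>
        if p.1 == (PySem.List.pyGet? (pre ++ pvPmax m xs) p.1).getD 0 then a + 1 else a) ans
    = ans + (pvScan (pre.length : Int) m xs).1 := by
  induction xs with
  | nil => intro pre m ans; simp [PySem.List.enumerate_nil, pvScan]
  | cons x xs ih =>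
    intro pre m ans
    rw [PySem.List.enumerate_cons]
    simp only [List.foldl_cons]
    have hget : PySem.List.pyGet? (pre ++ pvPmax m (x :: xs)) (pre.length : Int)
        = some (max m x) := by
      simp [pvPmax]
    have hcond : ((pre.length : Int) == (PySem.List.pyGet? (pre ++ pvPmax m (x :: xs))
        (pre.length : Int)).getD 0) = (max m x == (pre.length : Int)) := by
      rw [hget]
      simp only [Option.getD_some]
      by_cases h : (pre.length : Int) = max m x
      · simp [h]
      · simp [h, Ne.symm h]
    have hshape : pre ++ pvPmax m (x :: xs) = (pre ++ [max m x]) ++ pvPmax (max m x) xs := by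
      simp [pvPmax]
    have hlen : ((pre.length : Int) + 1) = (((pre ++ [max m x]).length : Int)) := by
      simp
    rw [hcond, hshape, hlen, ih]
    simp only [pvScan, List.length_append, List.length_cons, List.length_nil]
    push_cast
    split_ifs <;> ring

-- pvScan over a concatenation: scan the left part, thread its max into the right part
theorem pvScan_append (l1 : List Int) : ∀ (l2 : List Int) (i m : Int),
    pvScan i m (l1 ++ l2)
    = ((pvScan i m l1).1 + (pvScan (i + l1.length) (pvScan i m l1).2 l2).1,
       (pvScan (i + l1.length) (pvScan i m l1).2 l2).2) := by
  induction l1 with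
  | nil => intro l2 i m; simp [pvScan]
  | cons x l1 ih =>
    intro l2 i m
    simp only [List.cons_append, pvScan, ih, List.length_cons]
    have h : (i + 1 + (l1.length : Int)) = i + ((l1.length : Int) + 1) := by ring
    push_cast
    rw [h]
    refine Prod.ext ?_ rfl
    simp only
    ring

-- the divide-and-conquer solver equals the linear scan of its interval
theorem pvSolveB_eq (arr : List Int) : ∀ (d lo hi : Nat) (carry : Int), hi - lo = d →
    lo < hi → hi ≤ arr.length →
    pvSolveB arr lo hi carry = pvScan (lo : Int) carry ((arr.drop lo).take (hi - lo)) := by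
  intro d
  induction d using Nat.strong_induction_on with
  | _ d ih =>
    intro lo hi carry hd hlh hha
    rw [pvSolveB]
    by_cases h : hi ≤ lo + 1
    · have hhi : hi = lo + 1 := by omega
      subst hhi
      have hlo : lo < arr.length := by omega
      have hdrop : arr.drop lo = arr[lo] :: arr.drop (lo + 1) := List.drop_eq_getElem_cons hlo
      have hget : PySem.List.pyGet? arr (lo : Int) = some arr[lo] := by
        rw [PySem.List.pyGet?_natCast]
        exact List.getElem?_eq_getElem hlo
      rw [if_pos h]
      show (if max carry ((PySem.List.pyGet? arr (lo : Int)).getD 0) == (lo : Int)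
              then (1 : Int) else 0,
            max carry ((PySem.List.pyGet? arr (lo : Int)).getD 0))
          = pvScan (lo : Int) carry ((arr.drop lo).take (lo + 1 - lo))
      have htake : (arr.drop lo).take (lo + 1 - lo) = [arr[lo]] := by
        rw [show lo + 1 - lo = 1 from by omega, hdrop]
        rfl
      rw [hget, htake]
      simp [pvScan]
    · rw [if_neg h]
      show ((pvSolveB arr lo ((lo + hi) / 2) carry).1
              + (pvSolveB arr ((lo + hi) / 2) hi (pvSolveB arr lo ((lo + hi) / 2) carry).2).1,
            (pvSolveB arr ((lo + hi) / 2) hi (pvSolveB arr lo ((lo + hi) / 2) carry).2).2)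
          = pvScan (lo : Int) carry ((arr.drop lo).take (hi - lo))
      have hmid1 : lo < (lo + hi) / 2 := by omega
      have hmid2 : (lo + hi) / 2 < hi := by omega
      rw [ih ((lo + hi) / 2 - lo) (by omega) lo ((lo + hi) / 2) carry rfl hmid1 (by omega)]
      rw [ih (hi - (lo + hi) / 2) (by omega) ((lo + hi) / 2) hi _ rfl hmid2 hha]
      have hsplit : (arr.drop lo).take (hi - lo)
          = (arr.drop lo).take ((lo + hi) / 2 - lo)
            ++ (arr.drop ((lo + hi) / 2)).take (hi - (lo + hi) / 2) := by
        rw [show hi - lo = ((lo + hi) / 2 - lo) + (hi - (lo + hi) / 2) by omega, List.take_add]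
        congr 1
        rw [List.drop_drop, show lo + ((lo + hi) / 2 - lo) = (lo + hi) / 2 from by omega]
      have hlen : ((arr.drop lo).take ((lo + hi) / 2 - lo)).length = (lo + hi) / 2 - lo := by
        rw [List.length_take, List.length_drop]
        omega
      rw [hsplit, pvScan_append, hlen]
      have hcast : (lo : Int) + (((lo + hi) / 2 - lo : Nat) : Int) = (((lo + hi) / 2 : Nat) : Int) := by
        omega
      rw [hcast]

-- ===== VERDICT (by name: the statement is the Claim_ definition above) =====
theorem maxChunksToSorted_better_spec : Claim_equal_maxChunksToSorted_better := by
  intro arr _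
  unfold Spec_maxChunksToSorted_better maxChunksToSorted_better maxChunksToSorted_better_alt
  simp only
  rw [pvFoldA_snd arr (-1) []]
  simp only [List.nil_append]
  have hA : (PySem.List.enumerate arr 0).foldl (fun a p =>
      if p.1 == (PySem.List.pyGet? (pvPmax (-1) arr) p.1).getD 0 then a + 1 else a) 0
      = (pvScan 0 (-1) arr).1 := by
    have := pvMainScan arr [] (-1) 0
    simpa using this
  refine hA.trans ?_
  by_cases he : arr = []
  · subst he
    simp [pvScan]
  · rw [if_neg he]
    have hlen : 0 < arr.length := List.length_pos_of_ne_nil he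
    rw [pvSolveB_eq arr arr.length 0 arr.length (-1) (by omega) hlen (le_refl _)]
    simp
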